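-- pv_equiv track=rewrite | github.com/Hasee10/i23-2578-NLP-Assignment2 | H-eval_bilstm.py | err_ner
-- ===== SOURCE A (Python) =====
-- def spans(xs):
--     out = []
--     i = 0
--     while i < len(xs):
--         y = xs[i]
--         if y.startswith("B-"):
--             tp = y[2:]
--             j = i + 1
--             while j < len(xs) and xs[j] == f"I-{tp}":
--                 j += 1
--             out.append((i, j, tp))
--             i = j
--         else:
--             i += 1
--     return out
--
-- def err_ner(sents, gls, pls):
--     fp = []
--     fn = []
--     for ws, gy, py in zip(sents, gls, pls):
--         gs = set(spans(gy))
--         ps = set(spans(py))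
--         for a, b, tp in sorted(ps - gs):
--             tx = " ".join(ws[a:b])
--             fp.append((" ".join(ws), tx, tp, "predicted entity not supported by gold sequence"))
--         for a, b, tp in sorted(gs - ps):
--             tx = " ".join(ws[a:b])
--             fn.append((" ".join(ws), tx, tp, "gold entity missed by model or reduced to O"))
--     return fp[:5], fn[:5]
-- ===== SOURCE B (Python) =====
-- def spans(xs):
--     # single-pass state machine: track one open entity (start, type), close it when the tag breaks
--     out = []
--     open_start = None
--     open_tp = None
--     for i, y in enumerate(xs):
--         if open_tp is not None and y == "I-" + open_tp:
--             continue
--         if open_tp is not None: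
--             out.append((open_start, i, open_tp))
--             open_tp = None
--         if y.startswith("B-"):
--             open_start = i
--             open_tp = y[2:]
--     if open_tp is not None:
--         out.append((open_start, len(xs), open_tp))
--     return out
--
-- def err_ner(sents, gls, pls):
--     fp = []
--     fn = []
--     for ws, gy, py in zip(sents, gls, pls):
--         gsp = spans(gy)
--         psp = spans(py)
--         sent = " ".join(ws)
--         # two-pointer merge of the two start-ordered span lists: equal -> advance both,
--         # smaller predicted -> false positive, smaller gold -> false negative
--         miss_p = []
--         miss_g = []
--         pi = 0
--         gi = 0
--         while pi < len(psp) and gi < len(gsp):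
--             if psp[pi] == gsp[gi]:
--                 pi += 1
--                 gi += 1
--             elif psp[pi] < gsp[gi]:
--                 miss_p.append(psp[pi])
--                 pi += 1
--             else:
--                 miss_g.append(gsp[gi])
--                 gi += 1
--         miss_p.extend(psp[pi:])
--         miss_g.extend(gsp[gi:])
--         fp += [(sent, " ".join(ws[a:b]), tp, "predicted entity not supported by gold sequence")
--                for a, b, tp in miss_p]
--         fn += [(sent, " ".join(ws[a:b]), tp, "gold entity missed by model or reduced to O")
--                for a, b, tp in miss_g]
--     return fp[:5], fn[:5]
-- ===== Notes on version B (the rewrite author's own statement) =====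
-- stated objective: alternative
-- what changed: spans becomes a single-pass state machine tracking one open entity instead of index-juggling nested while loops, and err_ner replaces the set-difference-then-sort (set(ps)-set(gs), sorted) with a two-pointer merge of the two start-ordered span lists that emits false positives and false negatives in one walk, without sets or sorting.
import Mathlib
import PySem

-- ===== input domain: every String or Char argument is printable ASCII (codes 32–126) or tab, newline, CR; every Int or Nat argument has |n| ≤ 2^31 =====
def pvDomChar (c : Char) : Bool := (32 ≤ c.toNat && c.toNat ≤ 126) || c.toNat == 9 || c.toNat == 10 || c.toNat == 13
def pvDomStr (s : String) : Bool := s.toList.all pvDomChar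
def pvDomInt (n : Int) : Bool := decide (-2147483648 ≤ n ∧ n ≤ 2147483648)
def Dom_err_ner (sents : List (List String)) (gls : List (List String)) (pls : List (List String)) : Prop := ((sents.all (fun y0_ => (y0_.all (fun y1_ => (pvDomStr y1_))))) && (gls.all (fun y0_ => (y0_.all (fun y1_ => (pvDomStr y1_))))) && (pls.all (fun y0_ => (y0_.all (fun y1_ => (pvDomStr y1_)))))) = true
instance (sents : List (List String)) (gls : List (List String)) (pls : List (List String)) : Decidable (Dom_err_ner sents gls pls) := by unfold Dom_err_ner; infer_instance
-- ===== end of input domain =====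

-- B replaces spans' nested index loops by a one-pass state machine and err_ner's
-- per-sentence set-difference-plus-sort by a two-pointer merge of the two
-- start-ordered span lists; same return value, similar cost (objective: alternative).

-- ===== PORT A =====

-- inner 'while j < len(xs) and xs[j] == f"I-{tp}": j += 1' of A's spans
def spansInnerA (xs : List String) (tp : String) (j : Nat) : Nat :=
  if h : j < xs.length then
    if xs[j] = "I-" ++ tp then spansInnerA xs tp (j + 1) else j
  else j
termination_by xs.length - j

-- needed by spansA's termination proof (cited in decreasing_by)
theorem le_spansInnerA (xs : List String) (tp : String) (j : Nat) :
    j ≤ spansInnerA xs tp j := by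
  induction j using spansInnerA.induct (xs := xs) (tp := tp) with
  | case1 j h heq ih => rw [spansInnerA]; simp only [h, heq, dif_pos, if_pos]; omega
  | case2 j h heq => rw [spansInnerA]; simp [h, heq]
  | case3 j h => rw [spansInnerA]; simp [h]

-- outer 'while i < len(xs)' of A's spans
def spansA (xs : List String) (i : Nat) : List (Int × Int × String) :=
  if h : i < xs.length then
    let y := xs[i]
    if PySem.Str.startswith y "B-" then
      let tp := PySem.Str.slice y (some 2) none
      let j := spansInnerA xs tp (i + 1)
      ((i : Int), (j : Int), tp) :: spansA xs j
    else
      spansA xs (i + 1)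
  else []
termination_by xs.length - i
decreasing_by
  · have := le_spansInnerA xs (PySem.Str.slice xs[i] (some 2) none) (i + 1); omega
  · omega

-- per-sentence body of A's err_ner loop.  spans always returns spans with strictly
-- increasing start indices (spansA_pairwise_fst below), so Python's lexicographic
-- tuple sort coincides with PySem.List.sorted keyed by the start index.
def stepA (acc : List (String × String × String × String) × List (String × String × String × String))
    (t : List String × List String × List String) :
    List (String × String × String × String) × List (String × String × String × String) :=
  let ws := t.1
  let gs := PySem.Set.ofList (spansA t.2.1 0)
  let ps := PySem.Set.ofList (spansA t.2.2 0)
  let fp := (PySem.List.sorted (PySem.Set.diff ps gs) (fun x => x.1) false).foldl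
    (fun fp s => fp ++ [(PySem.Str.join " " ws,
      PySem.Str.join " " (PySem.List.slice ws (some s.1) (some s.2.1)), s.2.2,
      "predicted entity not supported by gold sequence")]) acc.1
  let fn := (PySem.List.sorted (PySem.Set.diff gs ps) (fun x => x.1) false).foldl
    (fun fn s => fn ++ [(PySem.Str.join " " ws,
      PySem.Str.join " " (PySem.List.slice ws (some s.1) (some s.2.1)), s.2.2,
      "gold entity missed by model or reduced to O")]) acc.2
  (fp, fn)

def err_ner (sents : List (List String)) (gls : List (List String)) (pls : List (List String)) : (List (String × String × String × String)) × (List (String × String × String × String)) :=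
  let r := ((sents.zip (gls.zip pls)).map (fun t => (t.1, t.2.1, t.2.2))).foldl stepA ([], [])
  (PySem.List.slice r.1 none (some 5), PySem.List.slice r.2 none (some 5))

-- ===== PORT B =====

-- one step of B's spans state machine; state = (output so far, open entity)
def spansStepB (st : List (Int × Int × String) × Option (Int × String)) (p : Int × String) :
    List (Int × Int × String) × Option (Int × String) :=
  match st.2 with
  | some (s, tp) =>
    if p.2 = "I-" ++ tp then st
    else
      let out := st.1 ++ [(s, p.1, tp)]
      if PySem.Str.startswith p.2 "B-" then (out, some (p.1, PySem.Str.slice p.2 (some 2) none))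
      else (out, none)
  | none =>
    if PySem.Str.startswith p.2 "B-" then (st.1, some (p.1, PySem.Str.slice p.2 (some 2) none))
    else (st.1, none)

def spansB (xs : List String) : List (Int × Int × String) :=
  let st := (PySem.List.enumerate xs 0).foldl spansStepB ([], none)
  match st.2 with
  | some (s, tp) => st.1 ++ [(s, (xs.length : Int), tp)]
  | none => st.1

-- Python's '<' on (int, int, str) tuples
def ltSpan (a b : Int × Int × String) : Bool :=
  decide (a.1 < b.1 ∨ (a.1 = b.1 ∧ (a.2.1 < b.2.1 ∨ (a.2.1 = b.2.1 ∧ a.2.2 < b.2.2))))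

-- two-pointer merge of B: walks both start-ordered span lists once, returning
-- (spans only in the first list, spans only in the second list), each in order
def mergeDiffB : List (Int × Int × String) → List (Int × Int × String) →
    List (Int × Int × String) × List (Int × Int × String)
  | [], g => ([], g)
  | p, [] => (p, [])
  | p :: ps, g :: gs =>
    if p = g then mergeDiffB ps gs
    else if ltSpan p g then
      let r := mergeDiffB ps (g :: gs)
      (p :: r.1, r.2)
    else
      let r := mergeDiffB (p :: ps) gs
      (r.1, g :: r.2)

def stepB (acc : List (String × String × String × String) × List (String × String × String × String))
    (t : List String × List String × List String) :
    List (String × String × String × String) × List (String × String × String × String) :=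
  let ws := t.1
  let sent := PySem.Str.join " " ws
  let m := mergeDiffB (spansB t.2.2) (spansB t.2.1)
  (acc.1 ++ m.1.map (fun s => (sent,
      PySem.Str.join " " (PySem.List.slice ws (some s.1) (some s.2.1)), s.2.2,
      "predicted entity not supported by gold sequence")),
   acc.2 ++ m.2.map (fun s => (sent,
      PySem.Str.join " " (PySem.List.slice ws (some s.1) (some s.2.1)), s.2.2,
      "gold entity missed by model or reduced to O")))

def err_ner_alt (sents : List (List String)) (gls : List (List String)) (pls : List (List String)) : (List (String × String × String × String)) × (List (String × String × String × String)) :=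
  let r := ((sents.zip (gls.zip pls)).map (fun t => (t.1, t.2.1, t.2.2))).foldl stepB ([], [])
  (r.1.take 5, r.2.take 5)

-- ===== PRECONDITION & SPEC =====
def Spec_err_ner (sents : List (List String)) (gls : List (List String)) (pls : List (List String)) (out : (List (String × String × String × String)) × (List (String × String × String × String))) : Prop := out = err_ner_alt sents gls pls
instance (sents : List (List String)) (gls : List (List String)) (pls : List (List String)) (out : (List (String × String × String × String)) × (List (String × String × String × String))) : Decidable (Spec_err_ner sents gls pls out) := by unfold Spec_err_ner; infer_instance

-- ===== CLAIM (what is proved, stated in full; the proofs are below) =====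
def Claim_equal_err_ner : Prop := ∀ (sents : List (List String)) (gls : List (List String)) (pls : List (List String)), Dom_err_ner sents gls pls → Spec_err_ner sents gls pls (err_ner sents gls pls)

-- ===== LEMMAS AND PROOFS =====

theorem spansA_ge (xs : List String) (i : Nat) :
    ∀ p ∈ spansA xs i, (i : Int) ≤ p.1 := by
  induction i using spansA.induct (xs := xs) with
  | case1 i h y hB tp j ih =>
    intro p hp
    rw [spansA] at hp
    simp only [y, tp, j] at hB ih hp ⊢
    simp only [h, dif_pos, hB, if_pos] at hp
    rw [List.mem_cons] at hp
    rcases hp with rfl | hp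
    · simp
    · have h1 := le_spansInnerA xs (PySem.Str.slice xs[i] (some 2) none) (i + 1)
      have h2 := ih p hp
      have : ((i:Int)) ≤ ((spansInnerA xs (PySem.Str.slice xs[i] (some 2) none) (i + 1) : Nat) : Int) := by
        omega
      exact le_trans this h2
  | case2 i h y hB ih =>
    intro p hp
    rw [spansA] at hp
    simp only [y] at hB hp
    simp only [h, dif_pos, hB, if_neg] at hp
    have := ih p hp; omega
  | case3 i h =>
    intro p hp; rw [spansA] at hp; simp [h] at hp


theorem spansA_pairwise_fst (xs : List String) (i : Nat) :
    (spansA xs i).Pairwise (fun a b => a.1 < b.1) := by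
  induction i using spansA.induct (xs := xs) with
  | case1 i h y hB tp j ih =>
    rw [spansA]
    simp only [y, tp, j] at hB ih ⊢
    simp only [h, dif_pos, hB, if_pos]
    refine List.Pairwise.cons ?_ ih
    intro b hb
    have h1 := le_spansInnerA xs (PySem.Str.slice xs[i] (some 2) none) (i + 1)
    have h2 := spansA_ge xs _ b hb
    simp only
    have : ((i:Int)) < ((spansInnerA xs (PySem.Str.slice xs[i] (some 2) none) (i + 1) : Nat) : Int) := by
      omega
    exact lt_of_lt_of_le this h2
  | case2 i h y hB ih =>
    rw [spansA]
    simp only [y] at hB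
    simp only [h, dif_pos, hB, if_neg]
    exact ih
  | case3 i h => rw [spansA]; simp [h]

-- A-side continuation for a given machine state
def contA (xs : List String) (i : Nat) : Option (Int × String) → List (Int × Int × String)
  | none => spansA xs i
  | some (s, tp) => (s, (spansInnerA xs tp i : Int), tp) :: spansA xs (spansInnerA xs tp i)

def finishB (xs : List String) (st : List (Int × Int × String) × Option (Int × String)) :
    List (Int × Int × String) :=
  match st.2 with
  | some (s, tp) => st.1 ++ [(s, (xs.length : Int), tp)]
  | none => st.1

theorem foldl_spansStepB (xs : List String) (i : Nat) (hi : i ≤ xs.length)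
    (out : List (Int × Int × String)) (st : Option (Int × String)) :
    finishB xs ((PySem.List.enumerate (xs.drop i) (i : Int)).foldl spansStepB (out, st))
      = out ++ contA xs i st := by
  by_cases h : i < xs.length
  · have hdrop : xs.drop i = xs[i] :: xs.drop (i + 1) := List.drop_eq_getElem_cons h
    rw [hdrop, PySem.List.enumerate_cons, List.foldl_cons]
    have hcast : ((i : Int)) + 1 = ((i + 1 : Nat) : Int) := by push_cast; ring
    match st with
    | some (s, tp) =>
      by_cases hI : xs[i] = "I-" ++ tp
      · have hstep : spansStepB (out, some (s, tp)) ((i : Int), xs[i]) = (out, some (s, tp)) := by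
          simp only [spansStepB]; rw [if_pos hI]
        rw [hstep, hcast, foldl_spansStepB xs (i + 1) (by omega)]
        have : spansInnerA xs tp i = spansInnerA xs tp (i + 1) := by
          rw [spansInnerA]; simp [h, hI]
        simp [contA, this]
      · have hinner : spansInnerA xs tp i = i := by rw [spansInnerA]; simp [h, hI]
        by_cases hB : PySem.Str.startswith xs[i] "B-"
        · have hstep : spansStepB (out, some (s, tp)) ((i : Int), xs[i])
              = (out ++ [(s, (i : Int), tp)], some ((i : Int), PySem.Str.slice xs[i] (some 2) none)) := by
            simp only [spansStepB]; rw [if_neg hI, if_pos hB]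
          rw [hstep, hcast, foldl_spansStepB xs (i + 1) (by omega)]
          have hA : spansA xs i = ((i : Int), ((spansInnerA xs (PySem.Str.slice xs[i] (some 2) none) (i + 1) : Nat) : Int), PySem.Str.slice xs[i] (some 2) none) :: spansA xs (spansInnerA xs (PySem.Str.slice xs[i] (some 2) none) (i + 1)) := by
            rw [spansA]; simp only [dif_pos h]; rw [if_pos hB]
          simp [contA, hinner, hA]
        · have hstep : spansStepB (out, some (s, tp)) ((i : Int), xs[i])
              = (out ++ [(s, (i : Int), tp)], none) := by
            simp only [spansStepB]; rw [if_neg hI, if_neg hB]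
          rw [hstep, hcast, foldl_spansStepB xs (i + 1) (by omega)]
          have hA : spansA xs i = spansA xs (i + 1) := by
            rw [spansA]; simp only [dif_pos h]; rw [if_neg hB]
          simp [contA, hinner, hA]
    | none =>
      by_cases hB : PySem.Str.startswith xs[i] "B-"
      · have hstep : spansStepB (out, none) ((i : Int), xs[i])
            = (out, some ((i : Int), PySem.Str.slice xs[i] (some 2) none)) := by
          simp only [spansStepB]; rw [if_pos hB]
        rw [hstep, hcast, foldl_spansStepB xs (i + 1) (by omega)]
        have hA : spansA xs i = ((i : Int), ((spansInnerA xs (PySem.Str.slice xs[i] (some 2) none) (i + 1) : Nat) : Int), PySem.Str.slice xs[i] (some 2) none) :: spansA xs (spansInnerA xs (PySem.Str.slice xs[i] (some 2) none) (i + 1)) := by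
          rw [spansA]; simp only [dif_pos h]; rw [if_pos hB]
        simp [contA, hA]
      · have hstep : spansStepB (out, none) ((i : Int), xs[i]) = (out, none) := by
          simp only [spansStepB]; rw [if_neg hB]
        rw [hstep, hcast, foldl_spansStepB xs (i + 1) (by omega)]
        have hA : spansA xs i = spansA xs (i + 1) := by
          rw [spansA]; simp only [dif_pos h]; rw [if_neg hB]
        simp [contA, hA]
  · have hi' : i = xs.length := by omega
    subst hi'
    have hd : xs.drop xs.length = [] := List.drop_eq_nil_of_le (by omega)
    rw [hd]
    have hinner : ∀ tp, spansInnerA xs tp xs.length = xs.length := fun tp => by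
      rw [spansInnerA]; simp [h]
    have hA : spansA xs xs.length = [] := by rw [spansA]; simp [h]
    match st with
    | some (s, tp) => simp [PySem.List.enumerate, finishB, contA, hinner, hA]
    | none => simp [PySem.List.enumerate, finishB, contA, hA]
termination_by xs.length - i

theorem spansB_eq (xs : List String) : spansB xs = spansA xs 0 := by
  have := foldl_spansStepB xs 0 (by omega) [] none
  simpa [spansB, finishB, contA] using this

theorem notMem_of_fst_le (a b : Int × Int × String) (gs : List (Int × Int × String))
    (hle : a.1 ≤ b.1) (hne : a ≠ b) (hG : (b :: gs).Pairwise (fun x y => x.1 < y.1)) :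
    a ∉ b :: gs := by
  rw [List.mem_cons]
  rintro (rfl | hmem)
  · exact hne rfl
  · have := (List.pairwise_cons.mp hG).1 a hmem
    omega

theorem mergeDiffB_eq (P G : List (Int × Int × String))
    (hP : P.Pairwise (fun a b => a.1 < b.1)) (hG : G.Pairwise (fun a b => a.1 < b.1)) :
    mergeDiffB P G = (P.filter (fun p => decide (p ∉ G)), G.filter (fun g => decide (g ∉ P))) := by
  induction P, G using mergeDiffB.induct with
  | case1 g => simp [mergeDiffB]
  | case2 p hnil =>
    obtain ⟨a, t, rfl⟩ : ∃ a t, p = a :: t := by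
      cases p with
      | nil => exact absurd rfl hnil
      | cons a t => exact ⟨a, t, rfl⟩
    simp [mergeDiffB]
  | case3 ps p gs ih =>
    rw [mergeDiffB, if_pos rfl]
    have hp1 := (List.pairwise_cons.mp hP).1
    have hg1 := (List.pairwise_cons.mp hG).1
    rw [ih (List.pairwise_cons.mp hP).2 (List.pairwise_cons.mp hG).2]
    have e1 : ps.filter (fun x => decide (x ∉ p :: gs)) = ps.filter (fun x => decide (x ∉ gs)) := by
      apply List.filter_congr
      intro x hx
      have hxp : x ≠ p := by have := hp1 x hx; intro hc; subst hc; omega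
      simp [List.mem_cons, hxp]
    have e2 : gs.filter (fun x => decide (x ∉ p :: ps)) = gs.filter (fun x => decide (x ∉ ps)) := by
      apply List.filter_congr
      intro x hx
      have hxp : x ≠ p := by have := hg1 x hx; intro hc; subst hc; omega
      simp [List.mem_cons, hxp]
    have c1 : (decide (p ∉ p :: gs)) = false := by simp
    have c2 : (decide (p ∉ p :: ps)) = false := by simp
    simp only [List.filter_cons, c1, c2, e1, e2]
    simp
  | case4 p ps g gs hne hlt ih =>
    rw [mergeDiffB, if_neg hne, if_pos hlt]
    have hle : p.1 ≤ g.1 := by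
      have := of_decide_eq_true hlt
      rcases this with h | ⟨h, _⟩ <;> omega
    have hPc := List.pairwise_cons.mp hP
    rw [ih hPc.2 hG]
    have hpn : p ∉ g :: gs := notMem_of_fst_le p g gs hle hne hG
    have e2 : (g :: gs).filter (fun x => decide (x ∉ p :: ps)) =
        (g :: gs).filter (fun x => decide (x ∉ ps)) := by
      apply List.filter_congr
      intro x hx
      have hxp : x ≠ p := by
        rw [List.mem_cons] at hx
        rcases hx with rfl | hx
        · exact fun hc => hne hc.symm
        · have := (List.pairwise_cons.mp hG).1 x hx
          intro hc; subst hc; omega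
      simp [List.mem_cons, hxp]
    rw [e2]
    have c : (decide (p ∉ g :: gs)) = true := decide_eq_true hpn
    simp only [List.filter_cons, c, if_true]
  | case5 p ps g gs hne hlt ih =>
    rw [mergeDiffB, if_neg hne, if_neg hlt]
    have hle : g.1 ≤ p.1 := by
      by_contra hc
      exact hlt (by simp only [ltSpan, decide_eq_true_eq]; exact Or.inl (by omega))
    have hGc := List.pairwise_cons.mp hG
    rw [ih hP hGc.2]
    have hgne : g ≠ p := fun hc => hne hc.symm
    have hgn : g ∉ p :: ps := notMem_of_fst_le g p ps hle hgne hP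
    have e1 : (p :: ps).filter (fun x => decide (x ∉ g :: gs)) =
        (p :: ps).filter (fun x => decide (x ∉ gs)) := by
      apply List.filter_congr
      intro x hx
      have hxg : x ≠ g := by
        rw [List.mem_cons] at hx
        rcases hx with rfl | hx
        · exact hne
        · have := (List.pairwise_cons.mp hP).1 x hx
          intro hc; subst hc; omega
      simp [List.mem_cons, hxg]
    rw [e1]
    have c : (decide (g ∉ p :: ps)) = true := decide_eq_true hgn
    simp only [List.filter_cons, c, if_true]

theorem stepA_eq_stepB (acc : List (String × String × String × String) × List (String × String × String × String))
    (t : List String × List String × List String) : stepA acc t = stepB acc t := by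
  simp only [stepA, stepB]
  have hGp := spansA_pairwise_fst t.2.1 0
  have hPp := spansA_pairwise_fst t.2.2 0
  have hGnd : (spansA t.2.1 0).Nodup :=
    hGp.imp (fun {a b} h hc => by rw [hc] at h; exact lt_irrefl _ h)
  have hPnd : (spansA t.2.2 0).Nodup :=
    hPp.imp (fun {a b} h hc => by rw [hc] at h; exact lt_irrefl _ h)
  rw [PySem.Set.ofList_eq_self_of_nodup _ hGnd, PySem.Set.ofList_eq_self_of_nodup _ hPnd]
  have hdiff1 : PySem.Set.diff (spansA t.2.2 0) (spansA t.2.1 0)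
      = (spansA t.2.2 0).filter (fun x => decide (x ∉ spansA t.2.1 0)) := by
    simp [PySem.Set.diff]
  have hdiff2 : PySem.Set.diff (spansA t.2.1 0) (spansA t.2.2 0)
      = (spansA t.2.1 0).filter (fun x => decide (x ∉ spansA t.2.2 0)) := by
    simp [PySem.Set.diff]
  rw [hdiff1, hdiff2]
  rw [PySem.List.sorted_eq_of_perm_of_pairwise_lt _ _ _ (List.Perm.refl _)
        (hPp.sublist List.filter_sublist),
      PySem.List.sorted_eq_of_perm_of_pairwise_lt _ _ _ (List.Perm.refl _)
        (hGp.sublist List.filter_sublist)]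
  rw [spansB_eq, spansB_eq, mergeDiffB_eq _ _ hPp hGp]
  rw [PySem.List.foldl_append_singleton_eq_map, PySem.List.foldl_append_singleton_eq_map]



-- ===== VERDICT (by name: the statement is the Claim_ definition above) =====
theorem err_ner_spec : Claim_equal_err_ner := by
  intro sents gls pls _
  unfold Spec_err_ner err_ner err_ner_alt
  rw [funext fun acc => funext fun t => stepA_eq_stepB acc t]
  have h5 : ∀ (l : List (String × String × String × String)),
      PySem.List.slice l none (some 5) = l.take 5 := fun l => by
    rw [PySem.List.slice_to l (by omega : (0:Int) ≤ 5)]; congr 1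
  simp [h5]
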